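-- pv_equiv track=rewrite | github.com/QuentinDuval/PythonExperiments | arrays/ReplaceWordsWithPrefix.py | search_prefix
-- ===== SOURCE A (Python) =====
-- def search_prefix(dictionary, word):
--     """
--     [bat, bot, cat, rat]
--     - looking for 'category' - want to find 'cat'
--     - looking for 'cottage' - want to find nothing
--     'lo' will point to where to insert (next bigger word)
--     'hi' will point to element just before (first smaller word)
--     """
--     lo = 0
--     hi = len(dictionary) - 1
--     while lo <= hi:
--         mid = lo + (hi - lo) // 2
--         if word == dictionary[mid]:
--             return word
--         elif word < dictionary[mid]:
--             hi = mid - 1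
--         else:
--             lo = mid + 1
--
--     if hi >= 0 and word.startswith(dictionary[hi]):
--         return dictionary[hi]
--     return None
-- ===== SOURCE B (Python) =====
-- def search_prefix(dictionary, word):
--     def locate(seg, base):
--         # insertion point of word within the full list (or None if word is hit),
--         # computed by recursing on actual sublists with a running offset
--         if not seg:
--             return base
--         m = (len(seg) - 1) // 2
--         if word == seg[m]:
--             return None
--         if word < seg[m]:
--             return locate(seg[:m], base)
--         return locate(seg[m + 1:], base + m + 1)
--
--     p = locate(dictionary, 0)
--     if p is None:
--         return word
--     if p > 0 and word.startswith(dictionary[p - 1]):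
--         return dictionary[p - 1]
--     return None
-- ===== Notes on version B (the rewrite author's own statement) =====
-- stated objective: alternative
-- what changed: A's iterative lo/hi index binary search is replaced by a recursion over actual list slices carrying a base offset that computes the insertion point, with the prefix test applied once to the predecessor of that point.
import Mathlib
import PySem

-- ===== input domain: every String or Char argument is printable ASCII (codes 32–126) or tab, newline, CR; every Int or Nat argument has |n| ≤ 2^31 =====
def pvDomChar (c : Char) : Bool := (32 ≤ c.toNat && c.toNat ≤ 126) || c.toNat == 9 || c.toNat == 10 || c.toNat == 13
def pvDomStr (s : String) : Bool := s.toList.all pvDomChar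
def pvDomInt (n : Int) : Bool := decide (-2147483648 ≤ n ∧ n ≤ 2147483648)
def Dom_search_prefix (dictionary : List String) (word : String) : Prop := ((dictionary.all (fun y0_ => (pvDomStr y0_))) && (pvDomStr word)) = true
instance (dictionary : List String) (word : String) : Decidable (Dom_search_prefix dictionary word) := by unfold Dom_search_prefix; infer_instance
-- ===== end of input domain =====

-- B replaces A's iterative lo/hi binary search by a recursion over actual list slices with a base offset computing the insertion point (objective: alternative; same comparison sequence, not faster).


-- ===== PORT A =====
-- Literal port of A's iterative binary search; the post-loop prefix check sits in the
-- loop's exit branch (transliteration of "while …" followed by the final if).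
def searchLoopA (dictionary : List String) (word : String) (lo hi : Int) : Option String :=
  if h : lo ≤ hi then
    let mid := lo + PySem.Int.floordiv (hi - lo) 2
    let d := PySem.List.pyGetD dictionary mid ""
    if word = d then some word
    else if word < d then searchLoopA dictionary word lo (mid - 1)
    else searchLoopA dictionary word (mid + 1) hi
  else
    let d := PySem.List.pyGetD dictionary hi ""
    if 0 ≤ hi ∧ PySem.Str.startswith word d then some d
    else none
termination_by (hi + 1 - lo).toNat
decreasing_by
  · have := PySem.Int.floordiv_eq_ediv_of_pos (a := hi - lo) (b := 2) (by norm_num)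
    rw [PySem.Int.floordiv_eq_ediv_of_pos (by norm_num)] at *; omega
  · have := PySem.Int.floordiv_eq_ediv_of_pos (a := hi - lo) (b := 2) (by norm_num)
    rw [PySem.Int.floordiv_eq_ediv_of_pos (by norm_num)] at *; omega

def search_prefix (dictionary : List String) (word : String) : Option String :=
  searchLoopA dictionary word 0 ((dictionary.length : Int) - 1)

-- ===== PORT B =====
-- B's helper: recursion on the physical sublist `seg` with running offset `base`;
-- returns the insertion point in the full list, or none when `word` is hit.
def locateB (word : String) : List String → Int → Option Int
  | [], base => some base
  | x :: xs, base =>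
      let m : Nat := ((x :: xs).length - 1) / 2
      let d := (x :: xs).getD m ""
      if word = d then none
      else if word < d then locateB word ((x :: xs).take m) base
      else locateB word ((x :: xs).drop (m + 1)) (base + m + 1)
termination_by seg => seg.length
decreasing_by
  · simp only [List.length_take, List.length_cons]; omega
  · simp only [List.length_cons, List.length_drop]; omega

def search_prefix_alt (dictionary : List String) (word : String) : Option String :=
  match locateB word dictionary 0 with
  | none => some word
  | some p =>
      if 0 < p ∧ PySem.Str.startswith word (PySem.List.pyGetD dictionary (p - 1) "") then
        some (PySem.List.pyGetD dictionary (p - 1) "")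
      else none

-- ===== PRECONDITION & SPEC =====
def Spec_search_prefix (dictionary : List String) (word : String) (out : Option String) : Prop := out = search_prefix_alt dictionary word
instance (dictionary : List String) (word : String) (out : Option String) : Decidable (Spec_search_prefix dictionary word out) := by unfold Spec_search_prefix; infer_instance

-- ===== CLAIM (what is proved, stated in full; the proofs are below) =====
def Claim_equal_search_prefix : Prop := ∀ (dictionary : List String) (word : String), Dom_search_prefix dictionary word → Spec_search_prefix dictionary word (search_prefix dictionary word)

-- ===== LEMMAS AND PROOFS =====
-- A's loop on the index window [base, base+n-1] and B's recursion on the sublist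
-- (dictionary.drop base).take n take the same branch at every step; A's exit branch
-- is exactly B's post-processing of the returned insertion point.
theorem loop_eq_locate (dictionary : List String) (word : String) :
    ∀ (n base : Nat), base + n ≤ dictionary.length →
      searchLoopA dictionary word (base : Int) ((base : Int) + n - 1) =
        (match locateB word ((dictionary.drop base).take n) (base : Int) with
         | none => some word
         | some p =>
             if 0 < p ∧ PySem.Str.startswith word (PySem.List.pyGetD dictionary (p - 1) "") then
               some (PySem.List.pyGetD dictionary (p - 1) "")
             else none) := by
  intro n
  induction n using Nat.strong_induction_on with
  | _ n ih =>
    intro base hle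
    rcases Nat.eq_zero_or_pos n with h0 | hpos
    · subst h0
      rw [searchLoopA]
      have hno : ¬ ((base : Int) ≤ (base : Int) + (0 : Nat) - 1) := by push_cast; omega
      rw [dif_neg hno]
      simp only [List.take_zero, locateB]
      have he : (base : Int) + (0 : Nat) - 1 = (base : Int) - 1 := by push_cast; ring
      rw [he]
      have hiff : ((0 : Int) ≤ (base : Int) - 1) = (0 < (base : Int)) := propext (by omega)
      simp only [hiff]
    · -- n ≥ 1: the segment is nonempty
      have hlen : ((dictionary.drop base).take n).length = n := by
        simp only [List.length_take, List.length_drop]; omega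
      have hne : (dictionary.drop base).take n ≠ [] := by
        intro h; rw [h] at hlen; simp at hlen; omega
      obtain ⟨x, xs, hseg⟩ := List.exists_cons_of_ne_nil hne
      have hxs : xs.length = n - 1 := by
        have := hlen; rw [hseg] at this; simp at this; omega
      set m : Nat := (n - 1) / 2 with hm_def
      have hmlt : m < n := by omega
      have hget : ((dictionary.drop base).take n).getD m "" = dictionary.getD (base + m) "" := by
        simp [List.getD_eq_getElem?_getD, hmlt, List.getElem?_drop]
      -- unfold A one step
      rw [searchLoopA]
      have hyes : (base : Int) ≤ (base : Int) + (n : Nat) - 1 := by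
        have : (1 : Int) ≤ (n : Nat) := by exact_mod_cast hpos
        omega
      rw [dif_pos hyes]
      have hmid : (base : Int) + PySem.Int.floordiv ((base : Int) + (n : Nat) - 1 - base) 2
          = ((base + m : Nat) : Int) := by
        rw [PySem.Int.floordiv_eq_ediv_of_pos (by norm_num)]
        omega
      simp only [hmid, PySem.List.pyGetD_natCast]
      -- unfold B one step
      rw [hseg, locateB]
      have hmB : ((x :: xs).length - 1) / 2 = m := by simp only [List.length_cons, hxs, hm_def]; omega
      simp only [hmB]
      have hgetB : (x :: xs).getD m "" = dictionary.getD (base + m) "" := by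
        rw [← hseg]; exact hget
      rw [hgetB]
      by_cases h1 : word = dictionary.getD (base + m) ""
      · simp [h1]
      · rw [if_neg h1, if_neg h1]
        by_cases h2 : word < dictionary.getD (base + m) ""
        · rw [if_pos h2, if_pos h2]
          have hA : ((base + m : Nat) : Int) - 1 = (base : Int) + (m : Nat) - 1 := by push_cast; ring
          rw [hA]
          have htk : (x :: xs).take m = (dictionary.drop base).take m := by
            rw [← hseg, List.take_take, Nat.min_eq_left (Nat.le_of_lt hmlt)]
          rw [htk]
          exact ih m hmlt base (by omega)
        · rw [if_neg h2, if_neg h2]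
          have hA1 : ((base + m : Nat) : Int) + 1 = ((base + m + 1 : Nat) : Int) := by push_cast; ring
          have hA2 : (base : Int) + (n : Nat) - 1
              = ((base + m + 1 : Nat) : Int) + ((n - (m + 1) : Nat) : Int) - 1 := by
            have h1n : (1 : Int) ≤ (n : Nat) := by exact_mod_cast hpos
            have : ((n - (m + 1) : Nat) : Int) = (n : Nat) - (m : Nat) - 1 := by
              have := hmlt; omega
            rw [this]; push_cast; ring
          rw [hA1, hA2]
          have hdr : (x :: xs).drop (m + 1) = (dictionary.drop (base + m + 1)).take (n - (m + 1)) := by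
            rw [← hseg, List.drop_take, List.drop_drop]
            congr 1
          have hbase : (base : Int) + (m : Nat) + 1 = ((base + m + 1 : Nat) : Int) := by push_cast; ring
          rw [hdr, hbase]
          exact ih (n - (m + 1)) (by omega) (base + m + 1) (by omega)

-- ===== VERDICT (by name: the statement is the Claim_ definition above) =====
theorem search_prefix_spec : Claim_equal_search_prefix := by
  intro dictionary word _
  unfold Spec_search_prefix search_prefix search_prefix_alt
  have h := loop_eq_locate dictionary word dictionary.length 0 (by omega)
  simpa using h
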